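-- pv_equiv track=rewrite | github.com/uct-cbio/proteomics-pipelines | proteogenomics/lib/proteomics.py | tryptic_digest
-- ===== SOURCE A (Python) =====
-- def tryptic_digest(protein , min_len = 7, max_len = 30):
--     digest = []
--     peptide = []
--
--     for aa in range(len(protein)):
--
--        current = protein[aa]
--        peptide.append(current)
--
--        if aa < len(protein) -1:
--             nxt = protein[aa + 1]
--             if ((current =='R') or (current=='K')) and (nxt != 'P'):
--                 digest.append(''.join(peptide))
--                 peptide = []
--
--        else:
--            digest.append(''.join(peptide))
--            peptide = []
--
--     filt_digest = []
--     for i in digest: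
--         if (len(i) >= min_len) and (len(i) <= max_len):
--             filt_digest.append(i)
--
--     return filt_digest
-- ===== SOURCE B (Python) =====
-- import re
--
-- def tryptic_digest(protein, min_len=7, max_len=30):
--     pieces = re.split(r'(?<=[KR])(?!P)', protein)
--     return [p for p in pieces if p and min_len <= len(p) <= max_len]
-- ===== Notes on version B (the rewrite author's own statement) =====
-- stated objective: idiomatic
-- what changed: Replaces the index loop with a mutable peptide accumulator and a second filtering loop by a single zero-width regex split at each position after K/R not followed by P, plus one comprehension keeping nonempty peptides in the length range.
import Mathlib
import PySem

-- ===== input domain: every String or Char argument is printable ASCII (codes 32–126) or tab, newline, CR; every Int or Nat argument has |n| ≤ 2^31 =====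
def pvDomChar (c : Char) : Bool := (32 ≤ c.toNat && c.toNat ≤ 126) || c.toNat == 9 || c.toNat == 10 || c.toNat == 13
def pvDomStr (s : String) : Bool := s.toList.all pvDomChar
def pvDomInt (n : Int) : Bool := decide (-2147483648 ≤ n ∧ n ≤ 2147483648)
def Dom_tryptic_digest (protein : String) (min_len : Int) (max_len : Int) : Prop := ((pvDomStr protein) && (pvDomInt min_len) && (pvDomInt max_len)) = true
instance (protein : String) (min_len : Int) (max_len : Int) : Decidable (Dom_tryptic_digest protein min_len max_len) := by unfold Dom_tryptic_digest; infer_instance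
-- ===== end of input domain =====

-- B replaces A's index loop with accumulator by a single regex split at every
-- zero-width boundary after K/R not followed by P, then one filter (idiomatic).

-- ===== PORT A =====
-- the length filter of A's second loop: len(i) >= min_len and len(i) <= max_len
def pvLenOk (min_len max_len : Int) (i : List Char) : Bool :=
  decide ((i.length : Int) ≥ min_len) && decide ((i.length : Int) ≤ max_len)

-- A's for-loop over range(len(protein)): one recursive step per index aa, with the
-- same state (digest, peptide); protein[aa] is the head, protein[aa+1] the lookahead,
-- and 'aa < len(protein)-1' is the 'rest nonempty' match.  Peptides are kept as the
-- char list A's 'peptide' holds; ''.join is the final String.mk.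
def tdLoop (digest : List (List Char)) (peptide : List Char) : List Char → List (List Char)
  | [] => digest
  | current :: rest =>
    let peptide := peptide ++ [current]
    match rest with
    | nxt :: _ =>
      if (current = 'R' || current = 'K') && !(nxt = 'P') then
        tdLoop (digest ++ [peptide]) [] rest
      else
        tdLoop digest peptide rest
    | [] => digest ++ [peptide]

def tryptic_digest (protein : String) (min_len : Int) (max_len : Int) : List String :=
  ((tdLoop [] [] protein.toList).filter (pvLenOk min_len max_len)).map String.mk

-- ===== PORT B =====
-- hand port of re.split(r'(?<=[KR])(?!P)', protein) (PySem has no regex): exact —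
-- the pattern matches the zero-width position after a K or R that is not followed
-- by P (including end of string), and re.split cuts at every such position.
def nextNotP : List Char → Bool
  | x :: _ => !(x = 'P')
  | [] => true

def splitKR : List Char → List (List Char)
  | [] => [[]]
  | c :: rest =>
    if (c = 'K' || c = 'R') && nextNotP rest then
      [c] :: splitKR rest
    else
      match splitKR rest with
      | [] => [[c]]          -- unreachable: splitKR never returns []
      | p :: ps => (c :: p) :: ps

def tryptic_digest_alt (protein : String) (min_len : Int) (max_len : Int) : List String :=
  ((splitKR protein.toList).filter
    (fun p => !p.isEmpty && pvLenOk min_len max_len p)).map String.mk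

-- ===== PRECONDITION & SPEC =====
def Spec_tryptic_digest (protein : String) (min_len : Int) (max_len : Int) (out : List String) : Prop := out = tryptic_digest_alt protein min_len max_len
instance (protein : String) (min_len : Int) (max_len : Int) (out : List String) : Decidable (Spec_tryptic_digest protein min_len max_len out) := by unfold Spec_tryptic_digest; infer_instance

-- ===== CLAIM (what is proved, stated in full; the proofs are below) =====
def Claim_equal_tryptic_digest : Prop := ∀ (protein : String) (min_len : Int) (max_len : Int), Dom_tryptic_digest protein min_len max_len → Spec_tryptic_digest protein min_len max_len (tryptic_digest protein min_len max_len)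

-- ===== LEMMAS AND PROOFS =====

-- the nonempty pieces of the regex split
def pvPieces (l : List Char) : List (List Char) :=
  (splitKR l).filter (fun p => !p.isEmpty)

-- prepend the pending peptide to the first piece (nothing to prepend to if none)
def pvGlue (p : List Char) : List (List Char) → List (List Char)
  | [] => []
  | q :: qs => (p ++ q) :: qs

theorem pvGlue_nil (q : List (List Char)) : pvGlue [] q = q := by
  cases q <;> simp [pvGlue]

-- splitKR of a nonempty list starts with a nonempty piece
theorem splitKR_cons (c : Char) (r : List Char) :
    ∃ h t, splitKR (c :: r) = h :: t ∧ h ≠ [] := by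
  rw [splitKR]
  split
  · exact ⟨[c], splitKR r, rfl, by simp⟩
  · cases hs : splitKR r with
    | nil => exact ⟨[c], [], rfl, by simp⟩
    | cons p ps => exact ⟨c :: p, ps, rfl, by simp⟩

theorem pvPieces_cons_cut (c : Char) (rest : List Char)
    (hc : ((c = 'K' || c = 'R') && nextNotP rest) = true) :
    pvPieces (c :: rest) = [c] :: pvPieces rest := by
  rw [pvPieces, splitKR, if_pos hc]; simp [List.filter, pvPieces]

theorem pvPieces_cons_nocut (c : Char) (rest : List Char) (h : List Char) (t : List (List Char))
    (hc : ¬ ((c = 'K' || c = 'R') && nextNotP rest) = true)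
    (hs : splitKR rest = h :: t) :
    pvPieces (c :: rest) = (c :: h) :: t.filter (fun p => !p.isEmpty) := by
  rw [pvPieces, splitKR, if_neg hc, hs]; simp [List.filter]

-- the key invariant: A's loop equals pending-peptide ++ the nonempty regex pieces
theorem tdLoop_eq (l : List Char) :
    ∀ digest peptide, tdLoop digest peptide l = digest ++ pvGlue peptide (pvPieces l) := by
  induction l with
  | nil => intro d p; simp [tdLoop, pvPieces, splitKR, List.filter, pvGlue]
  | cons c rest ih =>
    intro d p
    cases rest with
    | nil =>
      simp only [tdLoop]
      by_cases hc : ((c = 'K' || c = 'R') && nextNotP ([] : List Char)) = true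
      · rw [pvPieces_cons_cut c [] hc]
        simp [pvPieces, splitKR, List.filter, pvGlue]
      · rw [pvPieces_cons_nocut c [] [] [] hc rfl]
        simp [pvGlue]
    | cons nxt r2 =>
      have step : tdLoop d p (c :: nxt :: r2) =
          if ((c = 'R' || c = 'K') && !(nxt = 'P')) = true then
            tdLoop (d ++ [p ++ [c]]) [] (nxt :: r2)
          else tdLoop d (p ++ [c]) (nxt :: r2) := rfl
      rw [step]
      obtain ⟨h, t, hs, hne⟩ := splitKR_cons nxt r2
      have hbool : ((c = 'K' || c = 'R') && nextNotP (nxt :: r2))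
          = ((c = 'R' || c = 'K') && !(nxt = 'P')) := by
        simp [nextNotP, Bool.or_comm]
      by_cases hcut : ((c = 'R' || c = 'K') && !(nxt = 'P')) = true
      · rw [if_pos hcut, ih, pvGlue_nil]
        rw [pvPieces_cons_cut c (nxt :: r2) (hbool ▸ hcut)]
        simp [pvGlue]
      · rw [if_neg hcut, ih]
        rw [pvPieces_cons_nocut c (nxt :: r2) h t (by rw [hbool]; exact hcut) hs]
        have hrest : pvPieces (nxt :: r2) = h :: (t.filter (fun p => !p.isEmpty)) := by
          have hb : (!h.isEmpty) = true := by simpa [List.isEmpty_iff] using hne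
          rw [pvPieces, hs]; simp [List.filter, hb]
        rw [hrest]
        simp [pvGlue]

theorem tryptic_digest_spec : Claim_equal_tryptic_digest := by
  intro protein min_len max_len _
  unfold Spec_tryptic_digest tryptic_digest tryptic_digest_alt
  rw [tdLoop_eq, List.nil_append, pvGlue_nil, pvPieces, List.filter_filter]
  simp [Bool.and_comm]
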